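/- GENERATED by mk_final_copies.py from the proof of the farm's unit `decode_residue.5` (farm:decode_residue.5.1: Proof.lean) as the
   re-elaboration sweep compiled it — do not edit. -/
import Vorbis.Spec.Units.decode_residue_5
import Vorbis.Spec.Worked.decode_residue_5_Lemmas

open X86 X86.User Asan Vorbis Vorbis.Spec Vorbis.Spec.DecodeResidue

set_option maxRecDepth 4000
set_option maxHeartbeats 4000000

/-!
  decode_residue.5 (0x10ef70 – 0x10f13c; C 2170–2175): DECODE(q,f,c) expansion #1, `if (q == EOP) goto done`,
  `part_classdata[0][class_set] = r->classdata[q]`.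

  The segment is walked in four phases between three join points of its own (labels `joinB`, `joinC`, `joinD` of Lemmas.lean)
  and one more cut (`cutE`) before the final store; at every join the ENTRY assertion's content (COMMON and the loop part
  `DecodeA`) is re-established for the present memory by the carrying lemmas of Lemmas.lean (`carry_common`, `carry_decodeA`):

      phaseA  0x10ef70 → joinB 0x10efbb   `c = f->codebooks + r->classbook`; `prep_huffman(f)` when `valid_bits ≤ 9`
      phaseB  joinB    → joinC 0x10f06d   DECODE_RAW: the fast table, `codeword_lengths[var]`, `acc` / `valid_bits`;
                                          or `codebook_decode_scalar_raw(f, c)`; or `valid_bits = 0, var = -1`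
      phaseC  joinC    → joinD 0x10f0a6   `if (c->sparse) var = c->sorted_values[var]` (also for −1: K4's sentinel)
      phaseD  joinD    → cut37 (EOP) or cutE 0x10f0fb, then phaseE: the store, to cut16 with FILL(0, class_set + 1)
-/

namespace Vorbis.Spec.decode_residue_5

/-- The assertion at `joinB` (0x10efbb): the entry assertion again (COMMON and the loop part in the present memory), and
`r12 = c`, the class book. -/
structure AtB (u₀ : State) (g : G) (cs pcount : Nat) (s : State) : Prop where
  rip : s.rip = joinB
  common : Common u₀ g s
  ch2 : g.ch = 2
  r14 : s.reg .r14 = UInt64.ofNat g.r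
  loop : DecodeA g cs pcount s
  r12 : s.reg .r12 = UInt64.ofNat (cbk5 g)

/-- Phase A (0x10ef70 … 0x10efbb; C 2170, 2172): `c = f->codebooks + r->classbook` (three check sites: `f->codebooks`,
`r->classbook`, `f->valid_bits`), and `prep_huffman(f)` when `valid_bits ≤ 9`. Both arms end at `joinB` with the entry
assertion carried into the present memory and `r12 = c`. -/
theorem phaseA (Lay : Layout) (hLay : Lay.hi = 0x1000000) (μ : Microarch) (hμ : UserX.MicroOK μ) (u₀ : State)
    (hcode : HasCodeNat Lay u₀ Vorbis.L.decode_residue.entry Vorbis.Code.code_decode_residue.nat Vorbis.L.decode_residue.size)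
    (hld8 : Asan.SmallCheck Lay μ Vorbis.WayInv (Vorbis.CodeOK u₀) [.rax, .rcx, .rdx] 8 Vorbis.L.__asan_load8_noabort.entry)
    (hld1 : Asan.SmallCheck Lay μ Vorbis.WayInv (Vorbis.CodeOK u₀) [.rax, .rdx] 1 Vorbis.L.__asan_load1_noabort.entry)
    (hld4 : Asan.SmallCheck Lay μ Vorbis.WayInv (Vorbis.CodeOK u₀) [.rax, .rcx, .rdx] 4 Vorbis.L.__asan_load4_noabort.entry)
    (hprep : ∀ (others : List Obj) (frames : List (Nat × FrameLayout)) (Blk : Block → Prop) (len : Nat), Calls Lay μ Vorbis.WayInv (Vorbis.conv u₀) Vorbis.L.prep_huffman.entry (Vorbis.Spec.prep_huffman.spec others frames Blk len))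
    (g : G) (hent : Entered u₀ g) (cs pcount : Nat) (v : State) (hat : At10 u₀ g cs pcount v) :
    ReachVia Lay μ WayInv v (AtB u₀ g cs pcount) := by
  obtain ⟨hrip, hc, hch2, hr14, hloop⟩ := hat
  have he := hent.entry
  v_entry he
  have hprep' := hprep g.others' g.frames' g.Blk g.len
  have hwf := where_f hent
  have hwr := where_r hent hc
  obtain ⟨ecb, hcb, hapart, hbook, hcl⟩ := book_facts hent hc
  obtain ⟨f, hf⟩ : ∃ f : Nat, (g.e.reg .rdi).toNat = f := ⟨_, rfl⟩
  have hgf : g.f = f := hf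
  have hrdi : g.e.reg .rdi = addr f := eq_addr _ _ hf
  obtain ⟨r, hr⟩ : ∃ r : Nat, g.r = r := ⟨_, rfl⟩
  rw [hgf, hr] at hwr
  rw [hgf] at hwf
  obtain ⟨hwr1, hwr2, hwr3, -⟩ := hwr
  obtain ⟨hwf1, hwf2, hwf3⟩ := hwf
  have haf : (addr f).toNat = f := toNat_addr f (by omega)
  have har : (addr r).toNat = r := toNat_addr r (by omega)
  have w_rip := hrip
  have hv_rsp := hc.rsp
  have hv_rbp := hc.rbp
  have hv_r14 : v.reg .r14 = addr r := by rw [hr14, hr]; rfl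
  clear hr14
  have hv_r15 := hloop.r15
  have w_eq : Mem.EqOn Vorbis.L.textLo Vorbis.L.textHi u₀.mem v.mem := hc.code
  have hdf : v.flags .df = false := (show abiInv _ from hc.inv).1
  have hmx : v.mxcsr &&& 0x1F80 = 0x1F80 := (show abiInv _ from hc.inv).2
  have hsse := Vorbis.sseOK_of_abiInv hc.inv
  have fr_f : UInt64.ofNat (v.mem.readLE (g.e.reg .rsp - 184) 8) = addr f := by rw [hc.fr_f, hrdi]
  have ld_cbs : v.mem.readLE (addr f + 168) 8 = stb_vorbis.codebooks v.mem f := by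
    simp only [vfield, vacc, voff]
  have ld_cb : v.mem.readLE (addr r + 13) 1 = Residue.classbook v.mem r := by
    simp only [vfield, vacc, voff]
  have ld_vb : v.mem.readLE (addr f + 1768) 4 = (v.mem.u32 (f + 1768)) := by
    simp only [vfield, vacc, voff]
  u_walk hcode [hμ.vendor] until [joinB] span [Vorbis.L.textLo, Vorbis.L.textHi] side (v_side)
  case check_10ef7e =>
    -- 0x10ef7e, load8 [f + 168] (`f->codebooks`)
    have hun : ShadowUntouched v.mem s_10ef7e.mem := by v_untouched
    exact Vorbis.Spec.check_site hc.shadow hun (site_f5 hc 168 8 (by omega) (by omega))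
      (by rw [hgf]; simp only [vfield]; exact toNat_addr _ (by omega))
  case check_10ef8e =>
    -- 0x10ef8e, load1 [r + 13] (`r->classbook`)
    have hun : ShadowUntouched v.mem s_10ef8e.mem := by v_untouched
    exact Vorbis.Spec.check_site hc.shadow hun (site_r hent hc 13 1 (by omega) (by omega))
      (by rw [hr]; simp only [vfield]; exact toNat_addr _ (by omega))
  case check_10efa9 =>
    -- 0x10efa9, load4 [f + 0x6e8] (`f->valid_bits`)
    have hun : ShadowUntouched v.mem s_10efa9.mem := by v_untouched
    exact Vorbis.Spec.check_site hc.shadow hun (site_f5 hc 1768 4 (by omega) (by omega))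
      (by rw [hgf]; simp only [vfield]; exact toNat_addr _ (by omega))
  case call_inv => v_inv
  case pre_10f10b =>
    have hun : ShadowUntouched v.mem s_10f10b.mem := by v_untouched
    have hs1 : Mem.SameExcept [⟨(g.e.reg .rsp).toNat - 256, (g.e.reg .rsp).toNat - 248⟩] v.mem s_10f10b.mem := by
      u_same
    have hbits : Bits g.Blk g.len v.mem g.f := (show Real.VorbisOK g.len g.Blk v.mem g.f from hc.point.vorbis).bits
    refine prep_pre hent _ (shadowPre_call5 hent hc w_rsp hun) (by rw [w_rdi, hgf]; exact toNat_addr _ (by omega)) ?_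
    exact (Vorbis.Spec.Reader.reader_of_window hbits hs1 (by omega)).1
  case cont =>
    -- after prep_huffman
    v_after_call w_rsp_10f10b w_mem_10f10b
    simp only [w_rdi_10f10b] at w_same
    have fr_f' : UInt64.ofNat (s_10f10br.mem.readLE (g.e.reg .rsp - 184) 8) = addr f := by u_frame fr_f
    have hpost : PrepHuffmanPost g.Blk g.len (s_10f10b.reg .rdi).toNat s_10f10b s_10f10br := w_post
    rw [w_rdi_10f10b, haf, ← hgf] at hpost
    u_walk hcode [hμ.vendor] until [joinB] span [Vorbis.L.textLo, Vorbis.L.textHi] side (v_side)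
    refine ReachVia.done ?_
    have hbits : Bits g.Blk g.len v.mem g.f := (show Real.VorbisOK g.len g.Blk v.mem g.f from hc.point.vorbis).bits
    have hs1 : Mem.SameExcept [⟨(g.e.reg .rsp).toNat - 256, (g.e.reg .rsp).toNat - 248⟩] v.mem s_10f10b.mem := by
      rw [w_mem_10f10b]
      u_same
    have hmu1 := (Vorbis.Spec.Reader.reader_of_window hbits hs1 (by omega)).2
    have hs : Mem.SameExcept (wins5 g) v.mem s_10f110.mem := by
      unfold wins5
      rw [hf]
      u_same
    have hun : ShadowUntouched v.mem s_10f110.mem := by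
      rw [w_mem]
      have h1 : ShadowUntouched v.mem s_10f10b.mem := by
        rw [w_mem_10f10b]
        v_untouched
      exact h1.trans hpost.untouched
    have hcs : Common u₀ g s_10f110 := by
      apply carry_common hent hc (by rw [w_kept .rbp rfl]; exact hv_rbp) w_rsp w_eq (by v_inv) ?_ hs hun
      · rw [w_mem]
        exact hpost.reader.bits
      · rw [w_mem]
        have := hpost.reader.mu_le
        omega
      · rw [w_mem, hrdi]
        exact fr_f'
    refine ⟨w_rip, hcs, hch2, ?_, ?_, ?_⟩
    · rw [w_kept .r14 rfl, hv_r14, hr]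
      rfl
    · exact carry_decodeA hent hc hcs hch2 hs hloop (by rw [w_kept .r15 rfl]; exact hv_r15)
    · rw [w_r12, r12_eq _ _ (by rw [← hr]; exact hcl), ← hgf, ← hr, ecb]
  case cont =>
    -- `valid_bits > 9`: no call
    refine ReachVia.done ?_
    have hbits : Bits g.Blk g.len v.mem g.f := (show Real.VorbisOK g.len g.Blk v.mem g.f from hc.point.vorbis).bits
    have hs1 : Mem.SameExcept [⟨(g.e.reg .rsp).toNat - 256, (g.e.reg .rsp).toNat - 248⟩] v.mem s_10efb5.mem := by
      u_same
    obtain ⟨hb1, hmu1⟩ := Vorbis.Spec.Reader.reader_of_window hbits hs1 (by omega)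
    have hs : Mem.SameExcept (wins5 g) v.mem s_10efb5.mem := by
      unfold wins5
      rw [hf]
      u_same
    have hun : ShadowUntouched v.mem s_10efb5.mem := by v_untouched
    have hcs : Common u₀ g s_10efb5 := by
      apply carry_common hent hc (by rw [w_kept .rbp rfl]; exact hv_rbp) w_rsp w_eq (by v_inv) ?_ hs hun hb1 (by omega)
      rw [hrdi]
      u_resolve
    refine ⟨w_rip, hcs, hch2, ?_, ?_, ?_⟩
    · rw [w_kept .r14 rfl, hv_r14, hr]
      rfl
    · exact carry_decodeA hent hc hcs hch2 hs hloop (by rw [w_kept .r15 rfl]; exact hv_r15)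
    · rw [w_r12, r12_eq _ _ (by rw [← hr]; exact hcl), ← hgf, ← hr, ecb]

/-- The assertion at `joinC` (0x10f06d): as at `joinB`, and `r13d` holds a DECODE_RAW result. -/
structure AtC (u₀ : State) (g : G) (cs pcount : Nat) (s : State) : Prop where
  rip : s.rip = joinC
  common : Common u₀ g s
  ch2 : g.ch = 2
  r14 : s.reg .r14 = UInt64.ofNat g.r
  loop : DecodeA g cs pcount s
  r12 : s.reg .r12 = UInt64.ofNat (cbk5 g)
  r13 : ∃ q : Int, DecodeRawResult s.mem (cbk5 g) q ∧ s.reg .r13 = word32 q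

/-- Phase B (0x10efbb … 0x10f06d; C 2172): the inline DECODE_RAW. Five check sites (`f->acc`, `c->fast_huffman[acc & 1023]`,
`c->codeword_lengths`, `codeword_lengths[var]` by K5, `f->valid_bits`); three arms: the call of codebook_decode_scalar_raw when
the table entry is negative; the fast path with `valid_bits - len ≥ 0` (V1 by `vb_bound'`); `valid_bits := 0, var := -1`. -/
theorem phaseB (Lay : Layout) (hLay : Lay.hi = 0x1000000) (μ : Microarch) (hμ : UserX.MicroOK μ) (u₀ : State)
    (hcode : HasCodeNat Lay u₀ Vorbis.L.decode_residue.entry Vorbis.Code.code_decode_residue.nat Vorbis.L.decode_residue.size)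
    (hld8 : Asan.SmallCheck Lay μ Vorbis.WayInv (Vorbis.CodeOK u₀) [.rax, .rcx, .rdx] 8 Vorbis.L.__asan_load8_noabort.entry)
    (hld1 : Asan.SmallCheck Lay μ Vorbis.WayInv (Vorbis.CodeOK u₀) [.rax, .rdx] 1 Vorbis.L.__asan_load1_noabort.entry)
    (hld4 : Asan.SmallCheck Lay μ Vorbis.WayInv (Vorbis.CodeOK u₀) [.rax, .rcx, .rdx] 4 Vorbis.L.__asan_load4_noabort.entry)
    (hld2 : Asan.SmallCheck Lay μ Vorbis.WayInv (Vorbis.CodeOK u₀) [.rax, .rcx, .rdx] 2 Vorbis.L.__asan_load2_noabort.entry)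
    (hraw : ∀ (others : List Obj) (frames : List (Nat × FrameLayout)) (Blk : Block → Prop) (len : Nat), Calls Lay μ Vorbis.WayInv (Vorbis.conv u₀) Vorbis.L.codebook_decode_scalar_raw.entry (Vorbis.Spec.codebook_decode_scalar_raw.spec others frames Blk len))
    (g : G) (hent : Entered u₀ g) (cs pcount : Nat) (v : State) (hat : AtB u₀ g cs pcount v) :
    ReachVia Lay μ WayInv v (AtC u₀ g cs pcount) := by
  obtain ⟨hrip, hc, hch2, hr14, hloop, hr12⟩ := hat
  have he := hent.entry
  v_entry he
  have hraw' := hraw g.others' g.frames' g.Blk g.len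
  have hwf := where_f hent
  obtain ⟨ecb, hcb, hapart, hbook, hcl⟩ := book_facts hent hc
  obtain ⟨f, hf⟩ : ∃ f : Nat, (g.e.reg .rdi).toNat = f := ⟨_, rfl⟩
  have hgf : g.f = f := hf
  have hrdi : g.e.reg .rdi = addr f := eq_addr _ _ hf
  obtain ⟨cb, hcbk⟩ : ∃ cb : Nat, cbk5 g = cb := ⟨_, rfl⟩
  rw [hgf] at hwf
  obtain ⟨hwf1, hwf2, hwf3⟩ := hwf
  have haf : (addr f).toNat = f := toNat_addr f (by omega)
  have w_rip := hrip
  have hv_rsp := hc.rsp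
  have hv_rbp := hc.rbp
  have hv_r14 := hr14
  have hv_r15 := hloop.r15
  have hv_r12 : v.reg .r12 = addr cb := by rw [hr12, hcbk]; rfl
  clear hr12
  have w_eq : Mem.EqOn Vorbis.L.textLo Vorbis.L.textHi u₀.mem v.mem := hc.code
  have hdf : v.flags .df = false := (show abiInv _ from hc.inv).1
  have hmx : v.mxcsr &&& 0x1F80 = 0x1F80 := (show abiInv _ from hc.inv).2
  have hsse := Vorbis.sseOK_of_abiInv hc.inv
  have fr_f : UInt64.ofNat (v.mem.readLE (g.e.reg .rsp - 184) 8) = addr f := by rw [hc.fr_f, hrdi]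
  have hbits : Bits g.Blk g.len v.mem g.f := (show Real.VorbisOK g.len g.Blk v.mem g.f from hc.point.vorbis).bits
  have hobr := hbits.OBR.1
  rw [hgf] at hobr
  have hwc := where_cb hent hc
  rw [hcbk, hgf] at hwc
  obtain ⟨hwc1, hwc2, hwc3, hwc4⟩ := hwc
  have hacb : (addr cb).toNat = cb := toNat_addr cb (by omega)
  obtain ⟨acc, hacc⟩ : ∃ acc : Nat, v.mem.u32 (f + 1764) = acc := ⟨_, rfl⟩
  have ld_acc : v.mem.readLE (addr f + 1764) 4 = acc := by
    rw [← hacc]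
    simp only [vfield, vacc, voff]
  have hk := and_lt acc
  obtain ⟨fh, ld_fh⟩ : ∃ fh : Nat, v.mem.readLE
      (addr cb + (Word.ofBV (BitVec.setWidth 64 (BitVec.ofNat 32 acc &&& 1023#32)) + 24) * 2) 2 = fh := ⟨_, rfl⟩
  have hfh_lt : fh < 65536 := by
    rw [← ld_fh]
    exact Mem.readLE_lt _ _ _
  obtain ⟨cl, ld_cl⟩ : ∃ cl : Nat, v.mem.readLE (addr cb + 8) 8 = cl := ⟨_, rfl⟩
  obtain ⟨vb, ld_vb⟩ : ∃ vb : Nat, v.mem.readLE (addr f + 1768) 4 = vb := ⟨_, rfl⟩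
  u_walk hcode [hμ.vendor] until [joinC] span [Vorbis.L.textLo, Vorbis.L.textHi] side (v_side)
  case check_10efc9 =>
    -- 0x10efc9, load4 [f + 0x6e4] (`f->acc`)
    have hun : ShadowUntouched v.mem s_10efc9.mem := by v_untouched
    exact Vorbis.Spec.check_site hc.shadow hun (site_f5 hc 1764 4 (by omega) (by omega))
      (by rw [hgf]; simp only [vfield]; exact toNat_addr _ (by omega))
  case check_10eff3 =>
    -- 0x10eff3, load2 `c->fast_huffman[acc & 1023]`
    have hun : ShadowUntouched v.mem s_10eff3.mem := by v_untouched
    have hsite := site_cbf hent hc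
      (48 + 2 * (Word.ofBV (BitVec.setWidth 64 (BitVec.ofNat 32 acc &&& 1023#32))).toNat) 2 (by omega) (by omega)
    refine Vorbis.Spec.check_site hc.shadow hun hsite ?_
    rw [fh_addr, hcbk, toNat_addr _ (by omega)]
    omega
  case call_inv => v_inv
  case check_10f00f =>
    -- 0x10f00f, load8 [c + 8] (`c->codeword_lengths`)
    have hun : ShadowUntouched v.mem s_10f00f.mem := by v_untouched
    exact Vorbis.Spec.check_site hc.shadow hun (site_cbf hent hc 8 8 (by omega) (by omega))
      (by rw [hcbk]; simp only [vfield]; exact toNat_addr _ (by omega))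
  case check_10f047 =>
    -- 0x10f047, load4 [f + 0x6e8] (`f->valid_bits`)
    have hun : ShadowUntouched v.mem s_10f047.mem := by v_untouched
    exact Vorbis.Spec.check_site hc.shadow hun (site_f5 hc 1768 4 (by omega) (by omega))
      (by rw [hgf]; simp only [vfield]; exact toNat_addr _ (by omega))
  case check_10f020 =>
    -- 0x10f020, load1 `c->codeword_lengths[var]`, `var = fast_huffman[k] ≥ 0` (K5)
    have hun : ShadowUntouched v.mem s_10f020.mem := by v_untouched
    rw [low16] at hbr_10f004 ⊢
    have hnn := msb16_false fh hfh_lt hbr_10f004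
    rw [fh_addr] at ld_fh
    have efh := fast_eq v.mem cb _ fh ld_fh
    have ecl : Codebook.codeword_lengths v.mem cb = cl := by
      rw [← ld_cl]
      simp only [vfield, vacc, voff]
    have hsite := site_len hent hc _ hk (by rw [hcbk, efh]; exact hnn)
    rw [hcbk, efh, ecl] at hsite
    have hin := hsite.inside hc.point.env.covers
    refine Vorbis.Spec.check_site hc.shadow hun hsite ?_
    rw [ofBV_signExtend64, toInt_ofNat16 _ hfh_lt, word_nonneg _ hnn]
    show (addr (sint16 fh).toNat + addr cl).toNat = _
    rw [addr_add_addr, toNat_addr _ (by omega)]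
    omega
  case pre_10f134 =>
    -- the call of codebook_decode_scalar_raw(f, c): `fast_huffman[k] < 0`
    have hun : ShadowUntouched v.mem s_10f134.mem := by v_untouched
    have hs : Mem.SameExcept (wins5 g) v.mem s_10f134.mem := by
      unfold wins5
      rw [hf]
      u_same
    have hs1 : Mem.SameExcept [⟨(g.e.reg .rsp).toNat - 256, (g.e.reg .rsp).toNat - 176⟩] v.mem s_10f134.mem := by
      u_same
    exact raw_pre hent hc (shadowPre_call5 hent hc w_rsp hun) (by rw [w_rdi, haf, hgf]) (by rw [w_rsi, hacb, hcbk]) hs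
      (Vorbis.Spec.Reader.reader_of_window hbits hs1 (by omega)).1
  case cont =>
    -- after codebook_decode_scalar_raw
    v_after_call w_rsp_10f134 w_mem_10f134
    simp only [w_rdi_10f134] at w_same
    have fr_f' : UInt64.ofNat (s_10f134r.mem.readLE (g.e.reg .rsp - 184) 8) = addr f := by
      have hp : UInt64.ofNat (s_10f134.mem.readLE (g.e.reg .rsp - 184) 8) = addr f := by
        rw [w_mem_10f134]
        u_read
      rw [w_mem_10f134] at hp
      u_frame hp
    have hpost : ScalarRawPost g.Blk g.len s_10f134 s_10f134r := w_post
    obtain ⟨hpun, hprd, hphi, hpres⟩ := hpost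
    rw [w_rdi_10f134, haf, ← hgf] at hprd
    rw [w_rsi_10f134, hacb, ← hcbk] at hpres
    obtain ⟨z, w_rax⟩ : ∃ z, s_10f134r.reg .rax = z := ⟨_, rfl⟩
    rw [w_rax] at hphi hpres
    u_walk hcode [hμ.vendor] until [joinC] span [Vorbis.L.textLo, Vorbis.L.textHi] side (v_side)
    refine ReachVia.done ?_
    have hs0 : Mem.SameExcept (wins5 g) v.mem s_10f134.mem := by
      unfold wins5
      rw [hf, w_mem_10f134]
      u_same
    have hs1 : Mem.SameExcept [⟨(g.e.reg .rsp).toNat - 256, (g.e.reg .rsp).toNat - 176⟩] v.mem s_10f134.mem := by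
      rw [w_mem_10f134]
      u_same
    have hmu1 := (Vorbis.Spec.Reader.reader_of_window hbits hs1 (by omega)).2
    have hs : Mem.SameExcept (wins5 g) v.mem s_10f13c.mem := by
      unfold wins5
      rw [hf]
      u_same
    have hun : ShadowUntouched v.mem s_10f13c.mem := by
      rw [w_mem]
      have h1 : ShadowUntouched v.mem s_10f134.mem := by
        rw [w_mem_10f134]
        v_untouched
      exact h1.trans hpun
    have hcs : Common u₀ g s_10f13c := by
      apply carry_common hent hc (by rw [w_kept .rbp rfl]; exact hv_rbp) w_rsp w_eq (by v_inv) ?_ hs hun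
      · rw [w_mem]
        exact hprd.bits
      · rw [w_mem]
        have := hprd.mu_le
        omega
      · rw [w_mem, hrdi]
        exact fr_f'
    refine ⟨w_rip, hcs, hch2, ?_, ?_, ?_, ?_⟩
    · rw [w_kept .r14 rfl]
      exact hv_r14
    · exact carry_decodeA hent hc hcs hch2 hs hloop (by rw [w_kept .r15 rfl]; exact hv_r15)
    · rw [w_kept .r12 rfl, hv_r12, hcbk]
      rfl
    · refine ⟨argInt z, ?_, ?_⟩
      · exact rawResult_kept hent hc hs (rawResult_back hent hc hs0 hpres)
      · rw [w_r13, Vorbis.Spec.Reader.ofBV_part32_of_lt z hphi, word32_argInt z hphi]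
  case cont =>
    -- 0x10f115: `valid_bits - len < 0`: `valid_bits = 0`, VAR = -1
    refine ReachVia.done ?_
    have hs : Mem.SameExcept (wins5 g) v.mem s_10f125.mem := by
      unfold wins5
      rw [hf]
      u_same
    have hs2 : Mem.SameExcept [⟨(g.e.reg .rsp).toNat - 848, (g.e.reg .rsp).toNat - 176⟩,
        ⟨(g.e.reg .rdi).toNat + 1764, (g.e.reg .rdi).toNat + 1772⟩] v.mem s_10f125.mem := by
      rw [hf]
      u_same
    have hun : ShadowUntouched v.mem s_10f125.mem := by v_untouched
    have ea : addr f + 1768 = addr (f + 1768) := by simp only [vfield]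
    have hvb : -1 ≤ stb_vorbis.valid_bits s_10f125.mem g.f ∧ stb_vorbis.valid_bits s_10f125.mem g.f ≤ 32 := by
      have e : stb_vorbis.valid_bits s_10f125.mem g.f = s_10f125.mem.i32 (f + 1768) := by
        rw [hgf]
        simp only [vacc, voff]
      rw [e, w_mem, ea, Mem.i32_writeLE_same]
      decide
    obtain ⟨hb', hmu'⟩ := inline_final hent hbits hs2 hvb
    have hcs : Common u₀ g s_10f125 := by
      apply carry_common hent hc (by rw [w_kept .rbp rfl]; exact hv_rbp) w_rsp w_eq (by v_inv) ?_ hs hun hb' (by omega)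
      rw [hrdi]
      u_resolve
    refine ⟨w_rip, hcs, hch2, ?_, ?_, ?_, ?_⟩
    · rw [w_kept .r14 rfl]
      exact hv_r14
    · exact carry_decodeA hent hc hcs hch2 hs hloop (by rw [w_kept .r15 rfl]; exact hv_r15)
    · rw [w_kept .r12 rfl, hv_r12, hcbk]
      rfl
    · refine ⟨-1, Or.inl rfl, ?_⟩
      rw [w_r13]
      rfl
  case cont =>
    -- the fast path: `var = fast_huffman[k] ≥ 0`, `valid_bits -= len` stayed non-negative
    refine ReachVia.done ?_
    rw [low16] at hbr_10f004 w_r13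
    have hnn := msb16_false fh hfh_lt hbr_10f004
    rw [fh_addr] at ld_fh
    have efh := fast_eq v.mem cb _ fh ld_fh
    have hs : Mem.SameExcept (wins5 g) v.mem s_10f067.mem := by
      unfold wins5
      rw [hf]
      u_same
    have hs2 : Mem.SameExcept [⟨(g.e.reg .rsp).toNat - 848, (g.e.reg .rsp).toNat - 176⟩,
        ⟨(g.e.reg .rdi).toNat + 1764, (g.e.reg .rdi).toNat + 1772⟩] v.mem s_10f067.mem := by
      rw [hf]
      u_same
    have hun : ShadowUntouched v.mem s_10f067.mem := by v_untouched
    have ea : addr f + 1768 = addr (f + 1768) := by simp only [vfield]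
    have hvbV : -1 ≤ sint32 vb ∧ sint32 vb ≤ 32 := by
      have h1 := hbits.V1
      have e : stb_vorbis.valid_bits v.mem g.f = sint32 vb := by
        rw [hgf, ← ld_vb, ea]
        simp only [vacc, voff]
        rfl
      rw [e] at h1
      exact h1
    have hvb_lt : vb < 2 ^ 32 := by
      rw [← ld_vb]
      exact Mem.readLE_lt' _ _ _
    have hvb : -1 ≤ stb_vorbis.valid_bits s_10f067.mem g.f ∧ stb_vorbis.valid_bits s_10f067.mem g.f ≤ 32 := by
      have e : stb_vorbis.valid_bits s_10f067.mem g.f = s_10f067.mem.i32 (f + 1768) := by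
        rw [hgf]
        simp only [vacc, voff]
      rw [e, w_mem, ea, Mem.i32_writeLE_same_bv]
      exact vb_bound' vb hvb_lt _ hvbV hbr_10f067
    obtain ⟨hb', hmu'⟩ := inline_final hent hbits hs2 hvb
    have hcs : Common u₀ g s_10f067 := by
      apply carry_common hent hc (by rw [w_kept .rbp rfl]; exact hv_rbp) w_rsp w_eq (by v_inv) ?_ hs hun hb' (by omega)
      rw [hrdi]
      u_resolve
    refine ⟨w_rip, hcs, hch2, ?_, ?_, ?_, ?_⟩
    · rw [w_kept .r14 rfl]
      exact hv_r14
    · exact carry_decodeA hent hc hcs hch2 hs hloop (by rw [w_kept .r15 rfl]; exact hv_r15)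
    · rw [w_kept .r12 rfl, hv_r12, hcbk]
      rfl
    · refine ⟨sint16 fh, ?_, ?_⟩
      · apply rawResult_kept hent hc hs
        have h := hcb.decodeRaw_fast _ hk
        rw [hcbk, efh] at h
        rw [hcbk]
        exact h
      · rw [w_r13, ofBV_signExtend32, toInt_ofNat16 _ hfh_lt]

/-- The assertion at `joinD` (0x10f0a6): as at `joinC`, and `r13d` holds `q`, a DECODE result (−1 or an entry number). -/
structure AtD (u₀ : State) (g : G) (cs pcount : Nat) (s : State) : Prop where
  rip : s.rip = joinD
  common : Common u₀ g s
  ch2 : g.ch = 2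
  r14 : s.reg .r14 = UInt64.ofNat g.r
  loop : DecodeA g cs pcount s
  r13 : ∃ q : Int, DecodeResult s.mem (cbk5 g) q ∧ s.reg .r13 = word32 q

/-- Phase C (0x10f06d … 0x10f0a6; C 2172): `if (c->sparse) var = c->sorted_values[var]`, executed also for `var = −1`: the
load is then the word before the pointer (K4's block and sentinel: `sv_site`). -/
theorem phaseC (Lay : Layout) (hLay : Lay.hi = 0x1000000) (μ : Microarch) (hμ : UserX.MicroOK μ) (u₀ : State)
    (hcode : HasCodeNat Lay u₀ Vorbis.L.decode_residue.entry Vorbis.Code.code_decode_residue.nat Vorbis.L.decode_residue.size)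
    (hld8 : Asan.SmallCheck Lay μ Vorbis.WayInv (Vorbis.CodeOK u₀) [.rax, .rcx, .rdx] 8 Vorbis.L.__asan_load8_noabort.entry)
    (hld1 : Asan.SmallCheck Lay μ Vorbis.WayInv (Vorbis.CodeOK u₀) [.rax, .rdx] 1 Vorbis.L.__asan_load1_noabort.entry)
    (hld4 : Asan.SmallCheck Lay μ Vorbis.WayInv (Vorbis.CodeOK u₀) [.rax, .rcx, .rdx] 4 Vorbis.L.__asan_load4_noabort.entry)
    (g : G) (hent : Entered u₀ g) (cs pcount : Nat) (v : State) (hat : AtC u₀ g cs pcount v) :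
    ReachVia Lay μ WayInv v (AtD u₀ g cs pcount) := by
  obtain ⟨hrip, hc, hch2, hr14, hloop, hr12, q, hq, hr13⟩ := hat
  have he := hent.entry
  v_entry he
  have hwf := where_f hent
  obtain ⟨ecb, hcb, hapart, hbook, hcl⟩ := book_facts hent hc
  obtain ⟨f, hf⟩ : ∃ f : Nat, (g.e.reg .rdi).toNat = f := ⟨_, rfl⟩
  have hgf : g.f = f := hf
  have hrdi : g.e.reg .rdi = addr f := eq_addr _ _ hf
  obtain ⟨cb, hcbk⟩ : ∃ cb : Nat, cbk5 g = cb := ⟨_, rfl⟩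
  rw [hgf] at hwf
  obtain ⟨hwf1, hwf2, hwf3⟩ := hwf
  have haf : (addr f).toNat = f := toNat_addr f (by omega)
  have hbits : Bits g.Blk g.len v.mem g.f := (show Real.VorbisOK g.len g.Blk v.mem g.f from hc.point.vorbis).bits
  have hwc := where_cb hent hc
  rw [hcbk, hgf] at hwc
  obtain ⟨hwc1, hwc2, hwc3, hwc4⟩ := hwc
  have hacb : (addr cb).toNat = cb := toNat_addr cb (by omega)
  have w_rip := hrip
  have hv_rsp := hc.rsp
  have hv_rbp := hc.rbp
  have hv_r14 := hr14
  have hv_r15 := hloop.r15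
  have hv_r12 : v.reg .r12 = addr cb := by rw [hr12, hcbk]; rfl
  have hv_r13 := hr13
  clear hr12 hr13
  have w_eq : Mem.EqOn Vorbis.L.textLo Vorbis.L.textHi u₀.mem v.mem := hc.code
  have hdf : v.flags .df = false := (show abiInv _ from hc.inv).1
  have hmx : v.mxcsr &&& 0x1F80 = 0x1F80 := (show abiInv _ from hc.inv).2
  have hsse := Vorbis.sseOK_of_abiInv hc.inv
  obtain ⟨sp, ld_sp⟩ : ∃ sp : Nat, v.mem.readLE (addr cb + 27) 1 = sp := ⟨_, rfl⟩
  have esp : Codebook.sparse v.mem cb = sp := by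
    rw [← ld_sp]
    simp only [vfield, vacc, voff]
  obtain ⟨sv, ld_sv⟩ : ∃ sv : Nat, v.mem.readLE (addr cb + 2104) 8 = sv := ⟨_, rfl⟩
  have esv : Codebook.sorted_values v.mem cb = sv := by
    rw [← ld_sv]
    simp only [vfield, vacc, voff]
  have fr_f : UInt64.ofNat (v.mem.readLE (g.e.reg .rsp - 184) 8) = addr f := by rw [hc.fr_f, hrdi]
  have hsp_lt : sp < 256 := by
    rw [← ld_sp]
    exact Mem.readLE_lt' _ _ _
  by_cases hsp : sp = 0
  · -- a dense book: no translation
    u_walk hcode [hμ.vendor] until [joinD] span [Vorbis.L.textLo, Vorbis.L.textHi] side (v_side)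
    case check_10f072 =>
      -- 0x10f072, load1 [c + 0x1b] (`c->sparse`)
      have hun : ShadowUntouched v.mem s_10f072.mem := by v_untouched
      exact Vorbis.Spec.check_site hc.shadow hun (site_cbf hent hc 27 1 (by omega) (by omega))
        (by rw [hcbk]; simp only [vfield]; exact toNat_addr _ (by omega))
    case cont =>
      refine ReachVia.done ?_
      have hs : Mem.SameExcept (wins5 g) v.mem s_10f07d.mem := by
        unfold wins5
        rw [hf]
        u_same
      have hs1 : Mem.SameExcept [⟨(g.e.reg .rsp).toNat - 256, (g.e.reg .rsp).toNat - 248⟩] v.mem s_10f07d.mem := by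
        u_same
      obtain ⟨hb1, hmu1⟩ := Vorbis.Spec.Reader.reader_of_window hbits hs1 (by omega)
      have hun : ShadowUntouched v.mem s_10f07d.mem := by v_untouched
      have hcs : Common u₀ g s_10f07d := by
        apply carry_common hent hc (by rw [w_kept .rbp rfl]; exact hv_rbp) w_rsp w_eq (by v_inv) ?_ hs hun hb1 (by omega)
        rw [hrdi]
        u_resolve
      refine ⟨w_rip, hcs, hch2, ?_, ?_, q, ?_, ?_⟩
      · rw [w_kept .r14 rfl]
        exact hv_r14
      · exact carry_decodeA hent hc hcs hch2 hs hloop (by rw [w_kept .r15 rfl]; exact hv_r15)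
      · apply result_kept hent hc hs
        exact hcb.decode_dense (by rw [hcbk, esp]; exact hsp) hq
      · rw [w_kept .r13 rfl]
        exact hv_r13
  · -- a sparse book: `q = c->sorted_values[q]`, also for `q = -1` (K4's sentinel)
    obtain ⟨hsite, hsv4, hwa1, hwa2, hwa3, hq1, hq2, hres⟩ :=
      sv_site hent hc (by rw [hcbk, esp]; exact hsp) hq
    rw [hcbk, esv] at hsite hsv4 hwa1 hwa2 hwa3
    have hea := sv_addr sv q hq1 hq2 hsv4
    obtain ⟨a, ha⟩ : ∃ a : Nat, sv - 4 + 4 * (q + 1).toNat = a := ⟨_, rfl⟩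
    rw [ha] at hsite hwa1 hwa2 hwa3 hea
    have haa : (addr a).toNat = a := toNat_addr a (by omega)
    obtain ⟨x, ld_x⟩ : ∃ x : Nat, v.mem.readLE
        (Word.ofBV (BitVec.signExtend 64 (Word.part .w32 (word32 q))) <<< 2 + UInt64.ofNat sv) 4 = x := ⟨_, rfl⟩
    u_walk hcode [hμ.vendor] until [joinD] span [Vorbis.L.textLo, Vorbis.L.textHi] side (v_side)
    case check_10f072 =>
      -- 0x10f072, load1 [c + 0x1b] (`c->sparse`)
      have hun : ShadowUntouched v.mem s_10f072.mem := by v_untouched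
      exact Vorbis.Spec.check_site hc.shadow hun (site_cbf hent hc 27 1 (by omega) (by omega))
        (by rw [hcbk]; simp only [vfield]; exact toNat_addr _ (by omega))
    case check_10f087 =>
      -- 0x10f087, load8 [c + 0x838] (`c->sorted_values`)
      have hun : ShadowUntouched v.mem s_10f087.mem := by v_untouched
      exact Vorbis.Spec.check_site hc.shadow hun (site_cbf hent hc 2104 8 (by omega) (by omega))
        (by rw [hcbk]; simp only [vfield]; exact toNat_addr _ (by omega))
    case check_10f09e =>
      -- 0x10f09e, load4 `c->sorted_values[q]`, `q ≥ -1` (K4: the word before the pointer is the sentinel)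
      have hun : ShadowUntouched v.mem s_10f09e.mem := by v_untouched
      exact Vorbis.Spec.check_site hc.shadow hun hsite (by rw [hea]; exact haa)
    case cont =>
      refine ReachVia.done ?_
      have hs : Mem.SameExcept (wins5 g) v.mem s_10f0a3.mem := by
        unfold wins5
        rw [hf]
        u_same
      have hs1 : Mem.SameExcept [⟨(g.e.reg .rsp).toNat - 256, (g.e.reg .rsp).toNat - 248⟩] v.mem s_10f0a3.mem := by
        u_same
      obtain ⟨hb1, hmu1⟩ := Vorbis.Spec.Reader.reader_of_window hbits hs1 (by omega)
      have hun : ShadowUntouched v.mem s_10f0a3.mem := by v_untouched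
      have hcs : Common u₀ g s_10f0a3 := by
        apply carry_common hent hc (by rw [w_kept .rbp rfl]; exact hv_rbp) w_rsp w_eq (by v_inv) ?_ hs hun hb1 (by omega)
        rw [hrdi]
        u_resolve
      have hx_lt : x < 2 ^ 32 := by
        rw [← ld_x]
        exact Mem.readLE_lt' _ _ _
      have ex : Codebook.sortedValue v.mem (cbk5 g) q = sint32 x := by
        unfold Codebook.sortedValue
        rw [hcbk, esv, ha, ← ld_x, hea]
        rfl
      rw [ex] at hres
      refine ⟨w_rip, hcs, hch2, ?_, ?_, sint32 x, ?_, ?_⟩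
      · rw [w_kept .r14 rfl]
        exact hv_r14
      · exact carry_decodeA hent hc hcs hch2 hs hloop (by rw [w_kept .r15 rfl]; exact hv_r15)
      · exact result_kept hent hc hs hres
      · rw [w_r13]
        exact word32_sint32 x hx_lt

/-- The last cut inside the segment: `mov [r12], rbx` at 0x10f0fb, the store of pass 0. -/
abbrev cutE : Word := Vorbis.L.decode_residue.entry + 0x4fb

/-- The last two instructions of the segment, from the cut `cutE` (`mov [r12], rbx ; jmp 10f2e6`): the store of pass 0 into the
slot `class_set` of row 0 of the temp block, to the exit assertion `At16` with FILL(0, class_set + 1). -/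
theorem phaseE (Lay : Layout) (hLay : Lay.hi = 0x1000000) (μ : Microarch) (hμ : UserX.MicroOK μ) (u₀ : State)
    (hcode : HasCodeNat Lay u₀ Vorbis.L.decode_residue.entry Vorbis.Code.code_decode_residue.nat Vorbis.L.decode_residue.size)
    (g : G) (hent : Entered u₀ g) (cs pcount : Nat) (v : State) (hrip : v.rip = cutE) (hc : Common u₀ g v)
    (hch2 : g.ch = 2) (hr14 : v.reg .r14 = UInt64.ofNat g.r) (hloop : DecodeA g cs pcount v) (row : Nat)
    (hrow : RowPtr v.mem g.f g.r row) (hrow_lt : row < 2 ^ 64)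
    (hr12 : v.reg .r12 = addr (slot g.TB g.C g.PRD 0 cs)) (hrbx : v.reg .rbx = UInt64.ofNat row)
    (hacc : Lay.Has (addr (slot g.TB g.C g.PRD 0 cs)) 8) :
    ReachVia Lay μ WayInv v (fun v' => At16 u₀ g 0 cs pcount v' ∨ At37 u₀ g v') := by
  have he := hent.entry
  v_entry he
  have hwt := where_tb hent hc
  have hC : 0 < g.C := by
    have := hent.args.ch_le
    have e : g.C = nchan g.e.mem g.f := rfl
    omega
  have hcs : cs < g.PRD := hloop.wa.slot_lt (hc.w_pos hent) hloop.lt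
  have hsin := slot_inside g.TB hC hcs hc.tb.size
  obtain ⟨sl, hsl⟩ : ∃ sl : Nat, slot g.TB g.C g.PRD 0 cs = sl := ⟨_, rfl⟩
  rw [hsl] at hsin hr12 hacc
  obtain ⟨hwt1, hwt2, hwt3, hwt4, hwt5, hwt6⟩ := hwt
  have hasl : (addr sl).toNat = sl := toNat_addr sl (by omega)
  have hslw : 0x119d40 ≤ sl := by
    have := hent.pre.arenaText
    have e : L.textHi = 0x119d40 := rfl
    omega
  have w_rip := hrip
  have hv_rsp := hc.rsp
  have hv_rbp := hc.rbp
  have hv_r14 := hr14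
  have hv_r15 := hloop.r15
  have hv_r12 := hr12
  have hv_rbx := hrbx
  clear hr12 hrbx
  have w_eq : Mem.EqOn Vorbis.L.textLo Vorbis.L.textHi u₀.mem v.mem := hc.code
  have hdf : v.flags .df = false := (show abiInv _ from hc.inv).1
  have hmx : v.mxcsr &&& 0x1F80 = 0x1F80 := (show abiInv _ from hc.inv).2
  have hsse := Vorbis.sseOK_of_abiInv hc.inv
  u_walk hcode [hμ.vendor] until [Vorbis.L.decode_residue.cut16] span [Vorbis.L.textLo, Vorbis.L.textHi] side (v_side)
  refine ReachVia.done (Or.inl ?_)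
  have hmem : s_10f0ff.mem = v.mem.writeLE (addr (slot g.TB g.C g.PRD 0 cs)) 8 row := by
    have e : (UInt64.ofNat row).toNat = row := toNat_addr row hrow_lt
    rw [w_mem, hsl, e]
  have hun2 : ShadowUntouched v.mem s_10f0ff.mem := by
    rw [hmem, hsl]
    exact Mem.eqOn_writeLE _ (addr sl) 8 row 0xC00000 0x200000 (by omega) (by omega)
  obtain ⟨hc2, hs2⟩ := final_common hent hc hch2 hcs (by rw [w_kept .rbp rfl]; exact hv_rbp)
    (by rw [w_kept .rsp rfl]; exact hv_rsp) w_eq (by v_inv) row hmem hun2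
  have hin2 := final_inner hent hc hc2 hloop (by rw [w_kept .r15 rfl]; exact hv_r15) row hrow hrow_lt hmem hs2
  refine ⟨w_rip, hc2, hch2, ?_, hin2⟩
  rw [w_kept .r14 rfl]
  exact hv_r14

/-- Phase D (0x10f0a6 … 0x10f0fb or the trampoline; C 2173–2175): `if (q == EOP) goto done` (exit `At37`); else the address
arithmetic of `part_classdata[0][class_set] = r->classdata[q]` with its four check sites, up to the cut `cutE` before the store;
the store itself is `phaseE`. -/
theorem phaseD (Lay : Layout) (hLay : Lay.hi = 0x1000000) (μ : Microarch) (hμ : UserX.MicroOK μ) (u₀ : State)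
    (hcode : HasCodeNat Lay u₀ Vorbis.L.decode_residue.entry Vorbis.Code.code_decode_residue.nat Vorbis.L.decode_residue.size)
    (hld8 : Asan.SmallCheck Lay μ Vorbis.WayInv (Vorbis.CodeOK u₀) [.rax, .rcx, .rdx] 8 Vorbis.L.__asan_load8_noabort.entry)
    (hst8 : Asan.SmallCheck Lay μ Vorbis.WayInv (Vorbis.CodeOK u₀) [.rax, .rcx, .rdx] 8 Vorbis.L.__asan_store8_noabort.entry)
    (g : G) (hent : Entered u₀ g) (cs pcount : Nat) (v : State) (hat : AtD u₀ g cs pcount v) :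
    ReachVia Lay μ WayInv v (fun v' => At16 u₀ g 0 cs pcount v' ∨ At37 u₀ g v') := by
  obtain ⟨hrip, hc, hch2, hr14, hloop, q, hq, hr13⟩ := hat
  have he := hent.entry
  v_entry he
  have hwf := where_f hent
  have hwr := where_r hent hc
  have hwt := where_tb hent hc
  obtain ⟨f, hf⟩ : ∃ f : Nat, (g.e.reg .rdi).toNat = f := ⟨_, rfl⟩
  have hgf : g.f = f := hf
  have hrdi : g.e.reg .rdi = addr f := eq_addr _ _ hf
  obtain ⟨r, hr⟩ : ∃ r : Nat, g.r = r := ⟨_, rfl⟩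
  obtain ⟨tb, htb⟩ : ∃ tb : Nat, g.TB.base = tb := ⟨_, rfl⟩
  rw [hgf] at hwf
  rw [hgf, hr] at hwr
  obtain ⟨hwf1, hwf2, hwf3⟩ := hwf
  obtain ⟨hwr1, hwr2, hwr3, -⟩ := hwr
  have haf : (addr f).toNat = f := toNat_addr f (by omega)
  have har : (addr r).toNat = r := toNat_addr r (by omega)
  have hbits : Bits g.Blk g.len v.mem g.f := (show Real.VorbisOK g.len g.Blk v.mem g.f from hc.point.vorbis).bits
  have w_rip := hrip
  have hv_rsp := hc.rsp
  have hv_rbp := hc.rbp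
  have hv_r14 : v.reg .r14 = addr r := by rw [hr14, hr]; rfl
  have hv_r15 := hloop.r15
  have hv_r13 := hr13
  clear hr13 hr14
  have w_eq : Mem.EqOn Vorbis.L.textLo Vorbis.L.textHi u₀.mem v.mem := hc.code
  have hdf : v.flags .df = false := (show abiInv _ from hc.inv).1
  have hmx : v.mxcsr &&& 0x1F80 = 0x1F80 := (show abiInv _ from hc.inv).2
  have hsse := Vorbis.sseOK_of_abiInv hc.inv
  have fr_f : UInt64.ofNat (v.mem.readLE (g.e.reg .rsp - 184) 8) = addr f := by rw [hc.fr_f, hrdi]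
  have fr_pcd : v.mem.readLE (g.e.reg .rsp - 176) 8 = tb := by rw [hc.fr_pcd, htb]
  have sl_cs := hloop.sl_cs
  obtain ⟨cd, ld_cd⟩ : ∃ cd : Nat, v.mem.readLE (addr r + 16) 8 = cd := ⟨_, rfl⟩
  have hq_lt : q < 2 ^ 31 := by
    obtain ⟨_, hcb, _, _, _⟩ := book_facts hent hc
    have h2 := hcb.K1.ent_lt
    cases hq with
    | inl h => omega
    | inr h => omega
  have hpw := part32_word32 q
  have hTB : g.TB.live g.Live' := by
    have hbusy : ADOBusy g.A' g.others' v.mem g.f g.sz := hc.point.busy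
    exact hbusy.ok.tblock_live_inv hc.shadow hc.tblock
  have hC : 0 < g.C := by
    have := hent.args.ch_le
    have e : g.C = nchan g.e.mem g.f := rfl
    omega
  have hcs : cs < g.PRD := hloop.wa.slot_lt (hc.w_pos hent) hloop.lt
  have hsin := slot_inside g.TB hC hcs hc.tb.size
  obtain ⟨row0, ld_row0⟩ : ∃ row0 : Nat, v.mem.readLE (UInt64.ofNat tb) 8 = row0 := ⟨_, rfl⟩
  have erow0 : v.mem.ptr (g.TB.base + 8 * 0) = row0 := by
    rw [← ld_row0, htb, Nat.mul_zero, Nat.add_zero]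
    rfl
  have eslot : row0 + 8 * cs = slot g.TB g.C g.PRD 0 cs := by
    rw [← erow0]
    exact hc.tb.slot_eq hC cs
  obtain ⟨sl, hsl⟩ : ∃ sl : Nat, slot g.TB g.C g.PRD 0 cs = sl := ⟨_, rfl⟩
  rw [hsl] at eslot hsin
  obtain ⟨hwt1, hwt2, hwt3, hwt4, hwt5, hwt6⟩ := hwt
  have hsla := slot_addr row0 cs (by omega)
  rw [eslot] at hsla
  have hasl : (addr sl).toNat = sl := toNat_addr sl (by omega)
  have hslw : 0x119d40 ≤ sl := by
    have := hent.pre.arenaText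
    have e : L.textHi = 0x119d40 := rfl
    omega
  u_walk hcode [hμ.vendor] until [cutE, Vorbis.L.decode_residue.cut37] span [Vorbis.L.textLo, Vorbis.L.textHi] side (v_side)
  case check_10f0b4 =>
    -- 0x10f0b4, load8 [r + 16] (`r->classdata`)
    have hun : ShadowUntouched v.mem s_10f0b4.mem := by v_untouched
    exact Vorbis.Spec.check_site hc.shadow hun (site_r hent hc 16 8 (by omega) (by omega))
      (by rw [hr]; simp only [vfield]; exact toNat_addr _ (by omega))
  case check_10f0d1 =>
    -- 0x10f0d1, load8 [part_classdata] (the row pointer of row 0)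
    have hun : ShadowUntouched v.mem s_10f0d1.mem := by v_untouched
    have hsite := hc.tb.site_rowptr hTB hC (a := tb) (by rw [htb]; omega)
    exact Vorbis.Spec.check_site hc.shadow hun hsite (toNat_addr tb (by omega))
  case check_10f0eb =>
    -- 0x10f0eb, load8 `r->classdata[q]`, `0 ≤ q < entries` (the `q == EOP` test came first)
    have hun : ShadowUntouched v.mem s_10f0eb.mem := by v_untouched
    have hq1 : q ≠ -1 := by
      intro h
      apply hbr_10f0aa
      rw [hpw, h]
      rfl
    obtain ⟨h0, h2, hsite, -, -, -, -⟩ := cd_site hent hc hq hq1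
    have ecd : Residue.classdata v.mem g.r = cd := by
      rw [← ld_cd, hr]
      simp only [vfield, vacc, voff]
    rw [ecd] at hsite
    have hin := hsite.inside hc.point.env.covers
    exact Vorbis.Spec.check_site hc.shadow hun hsite (by rw [cd_addr cd q h0 h2]; exact toNat_addr _ (by omega))
  case check_10f0f6 =>
    -- 0x10f0f6, store8 `part_classdata[0][class_set]`, `class_set < part_read` (WA)
    have hun : ShadowUntouched v.mem s_10f0f6.mem := by v_untouched
    have hsite := hc.tb.site_slot hTB hC hcs (a := sl) (by rw [erow0]; exact eslot.symm)
    exact Vorbis.Spec.check_site hc.shadow hun hsite (by rw [hsla]; exact hasl)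
  case cont =>
    -- `q == EOP`: the trampoline
    refine ReachVia.done (Or.inr ?_)
    have hs : Mem.SameExcept (wins5 g) v.mem s_10f0aa.mem := by
      rw [w_mem]
      exact Mem.SameExcept.refl _ _
    have hun : ShadowUntouched v.mem s_10f0aa.mem := by v_untouched
    have hcs' : Common u₀ g s_10f0aa := by
      apply carry_common hent hc (by rw [w_kept .rbp rfl]; exact hv_rbp) (by rw [w_kept .rsp rfl]; exact hv_rsp) w_eq
        (by v_inv) ?_ hs hun
      · rw [w_mem]
        exact hbits
      · rw [w_mem]
        exact Nat.le_refl _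
      · rw [w_mem]
        exact hc.fr_f
    refine ⟨w_rip, hcs', ?_⟩
    rw [w_mem]
    exact hloop.path.sl_tap
  case cont =>
    -- 0x10f0fb: the store `part_classdata[0][class_set] = r->classdata[q]`
    have hq1 : q ≠ -1 := by
      intro h
      apply hbr_10f0aa
      rw [hpw, h]
      rfl
    obtain ⟨h0, h2, hsite, hw1, hw2, hw3, hrowptr⟩ := cd_site hent hc hq hq1
    have ecd : Residue.classdata v.mem g.r = cd := by
      rw [← ld_cd, hr]
      simp only [vfield, vacc, voff]
    rw [ecd] at hsite hw1 hw2 hw3 hrowptr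
    have hea := cd_addr cd q h0 h2
    obtain ⟨a, ha⟩ : ∃ a : Nat, cd + 8 * q.toNat = a := ⟨_, rfl⟩
    rw [ha] at hea hw1 hw2 hw3 hrowptr
    have haa : (addr a).toNat = a := toNat_addr a (by omega)
    have erow : (v.mem.writeLE (g.e.reg .rsp - 256) 8 1110256).readLE
        (Word.ofBV (BitVec.signExtend 64 (Word.part .w32 (word32 q))) <<< 3 + UInt64.ofNat cd) 8 = v.mem.ptr a := by
      rw [hea]
      have n1 : Mem.NoWrap (g.e.reg .rsp - 256) 8 := by u_omega
      have n2 : Mem.NoWrap (addr a) 8 := by u_omega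
      have n3 : (addr a).toNat + 8 ≤ (g.e.reg .rsp - 256).toNat ∨ (g.e.reg .rsp - 256).toNat + 8 ≤ (addr a).toNat := by
        u_omega
      exact Mem.readLE_writeLE_disjoint_noWrap v.mem (g.e.reg .rsp - 256) 8 1110256 (addr a) 8 n1 n2 n3
    rw [erow] at w_rbx
    obtain ⟨row, hrow⟩ : ∃ row : Nat, v.mem.ptr a = row := ⟨_, rfl⟩
    have hrow_lt : row < 2 ^ 64 := by
      rw [← hrow]
      exact Mem.ptr_lt _ _
    rw [hrow] at w_rbx hrowptr
    rw [hsla] at w_r12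
    have hs : Mem.SameExcept (wins5 g) v.mem s_10f0f6r.mem := by
      unfold wins5
      rw [hf]
      u_same
    have hs1 : Mem.SameExcept [⟨(g.e.reg .rsp).toNat - 256, (g.e.reg .rsp).toNat - 248⟩] v.mem s_10f0f6r.mem := by
      u_same
    obtain ⟨hb1, hmu1⟩ := Vorbis.Spec.Reader.reader_of_window hbits hs1 (by omega)
    have hun : ShadowUntouched v.mem s_10f0f6r.mem := by v_untouched
    have hc1 : Common u₀ g s_10f0f6r := by
      have hinv1 : abiInv s_10f0f6r := Vorbis.abiInv_of w_df_10f0f6 (by rw [w_mxcsr]; exact hmx)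
      apply carry_common hent hc (by rw [w_kept .rbp rfl]; exact hv_rbp) w_rsp w_eq hinv1 ?_ hs hun hb1 (by omega)
      rw [hrdi]
      u_resolve
    have hl1 : DecodeA g cs pcount s_10f0f6r :=
      carry_decodeA hent hc hc1 hch2 hs hloop (by rw [w_kept .r15 rfl]; exact hv_r15)
    have hrow1 : RowPtr s_10f0f6r.mem g.f g.r row := hrowptr.frame (reads_between hc hc1) (classdata_kept hent hc hs)
    have hr14' : s_10f0f6r.reg .r14 = UInt64.ofNat g.r := by
      rw [w_kept .r14 rfl, hv_r14, hr]
      rfl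
    refine phaseE Lay hLay μ hμ u₀ hcode g hent cs pcount s_10f0f6r w_rip hc1 hch2 hr14' hl1 row hrow1 hrow_lt ?_ w_rbx ?_
    · rw [w_r12, hsl]
    · rw [hsl, ← hsla]
      exact w_acc_10f0f6

end Vorbis.Spec.decode_residue_5

/-- Segment 5 of `decode_residue` takes its entry assertion `At10` to one of its exit assertions `At16` (with
FILL(0, class_set + 1)) or `At37` (`q == EOP`): the four phases composed with `ReachVia.trans`. -/
theorem Vorbis.Spec.Worked.decode_residue_5_ok : Vorbis.Spec.decode_residue_5.Statement := by
  intro Lay hLay μ hμ u₀ hcode hld8 hld1 hld4 hld2 hst8 hprep hraw g hent cs pcount v hat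
  refine (Vorbis.Spec.decode_residue_5.phaseA Lay hLay μ hμ u₀ hcode hld8 hld1 hld4 hprep g hent cs pcount v hat).trans ?_
  intro s1 h1
  refine (Vorbis.Spec.decode_residue_5.phaseB Lay hLay μ hμ u₀ hcode hld8 hld1 hld4 hld2 hraw g hent cs pcount s1 h1).trans ?_
  intro s2 h2
  refine (Vorbis.Spec.decode_residue_5.phaseC Lay hLay μ hμ u₀ hcode hld8 hld1 hld4 g hent cs pcount s2 h2).trans ?_
  intro s3 h3
  exact Vorbis.Spec.decode_residue_5.phaseD Lay hLay μ hμ u₀ hcode hld8 hst8 g hent cs pcount s3 h3
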